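/- PORTED by tools/port_fixed.py from Prog/Jsmn/S/StrEnds.lean to THE FIXED IMAGE fixed/jsmn_s.bin (same bytes at the same addresses; binFS). Do not edit: edit the original and port again. -/
/-
  jsmn_s.bin, `jsmn_parse_string`: the prologue (100154H → 100228H), `parser->pos++` (100221H → 100228H) and the epilogue (1001CAH → caller).
-/
import Prog.Jsmn.Fixed.Specs
import Prog.Jsmn.Fixed.CodeFS
import Prog.Jsmn.Fixed.S.StrInv
namespace X86
namespace J6
namespace FS
namespace Str
open X86.User (CodeAt RegsKept Span FlagsOK Layout toNat_add_ofNat toNat_ofNat_lt' add_ofNat_add)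
open Jsmn JsmnFSBytes

set_option maxRecDepth 100000
set_option maxHeartbeats 4000000
set_option linter.unusedSimpArgs false
set_option linter.unusedVariables false

variable {c : SCtx} {n : User.Layout} {v0 v : User.State}

/-- 100154H → 100228H: the prologue; `start = parser->pos; parser->pos++`. -/
theorem prologue (he : Entry c n v0) : Reach n v0 (fun v' => At c n v0 v' 0x100228 (u32 ((c.p.pos : Int) + 1))) := by
  obtain ⟨hp, hr8⟩ := he
  have hW := hp.toksW
  v3_open hp hW
  j6f_bin
  have hcode := JsmnFS.tjfs_jsmn_parse_string_code hp_call_img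
  have hpos : c.p.pos < 2 ^ 32 := hp_parser_pos ▸ User.Mem.readLE4_lt _ _
  v3_walk hcode hp.call.fetch [] until [0x100228]
  · refine Reach.done ⟨by simp, ⟨⟨by simp, by v3_kept, by v3_read, by v3_read, by v3_read, by v3_frame hp_call_retAddr, by unfold dataWins SCtx.tlen; v3_same, by v3_frame hcode,
      ⟨?_, by v3_frame hp_parser_toknext, by v3_frame hp_parser_toksuper⟩, ?_⟩, by simp, by simp, by simp, by simp, by simp [hr8], ?_, by v3_frame hp_text⟩⟩
    · show _ = u32 ((c.p.pos : Int) + 1)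
      rw [u32_succ]; v3_read
    · unfold SCtx.tlen at *; v3_frame hp_toksArg
    · v3_regnorm; v3_omega

/-- 100221H → 100228H: `parser->pos++`. -/
theorem next (he : Entry c n v0) {q : Nat} (ha : At c n v0 v 0x100221 q) : Reach n v (fun v' => At c n v0 v' 0x100228 (u32 ((q : Int) + 1))) := by
  obtain ⟨hp, hr8⟩ := he
  obtain ⟨hrip, hf⟩ := ha
  have hW := hp.toksW
  v3_open hp hf hW
  j6f_bin
  v3_walk hf_core_code hp.call.fetch [] until [0x100228]
  refine Reach.done ⟨by simp, ?_⟩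
  strs_frame_f
  show _ = u32 ((q : Int) + 1)
  rw [u32_succ]; v3_read

/-- 1001CAH → the caller: pop rbx, pop rbp, pop r12, ret. -/
theorem epilogue (he : Entry c n v0) {r : Int} {pp : Parser} {tk : Option Tokens} (ha : AtRet c n v0 v r pp tk) :
    Reach n v (ScanPost binFS binFS.useStr v0 c.ret c.pa c.tb c.numTokens c.toks r pp tk) := by
  obtain ⟨hp, hr8⟩ := he
  obtain ⟨hrip, hc, hrax⟩ := ha
  have hW := hp.toksW
  v3_open hp hc hW
  j6f_bin
  v3_walk hc_code hp.call.fetch [hp_call_retAddr, hp_call_retlt, hc_retA]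
  refine Reach.done ⟨⟨by simp, by simp, ?_, ?_⟩, ?_, ?_, ?_⟩
  · exact calleeSaved_of_six (by simp) (by simp) (by simp) (by simp [hc_kept.get .r13 rfl]) (by simp [hc_kept.get .r14 rfl])
      (by simp [hc_kept.get .r15 rfl])
  · v3_memnorm; exact hc_same
  · unfold RetInt; v3_regnorm; exact hrax
  · v3_memnorm; exact hc.parser
  · v3_memnorm; exact hc_toksArg

end Str
end FS
end J6
end X86
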